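-- pv_equiv track=rewrite | github.com/gcp825/advent_of_code | 2015/python/21.py | purchase_options
-- ===== SOURCE A (Python) =====
-- from itertools import combinations, product
--
-- def purchase_options(w_limits,a_limits,r_limits):
--
--     weapons = {'dagger':(8,4),'shortsword':(10,5),'warhammer':(25,6),'longsword':(40,7),'greataxe':(74,8)}
--     armour  = {'leather':(13,1),'chain':(31,2),'splint':(53,3),'banded':(75,4),'plate':(102,5)}
--     rings   = {'damage1':(25,1),'damage2':(50,2),'damage3':(100,3),'defence1':(20,1),'defence2':(40,2),'defence3':(80,3)}
--
--     inventories = product(combos(weapons,w_limits),combos(armour,a_limits),combos(rings,r_limits))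
--     quantified_inventories = []
--     for inv in inventories:
--         cost = 0;  damage_up = 0;  armour_up = 0
--         for i in inv[0]:
--             attr = weapons[i];  cost += attr[0];  damage_up += attr[1]
--         for i in inv[1]:
--             attr = armour[i];  cost += attr[0];  armour_up += attr[1]
--         for i in inv[2]:
--             attr = rings[i];
--             cost += attr[0];
--             if i.startswith('damage'): damage_up += attr[1]
--             if i.startswith('defence'): armour_up += attr[1]
--
--         quantified_inventories += [(cost,damage_up,armour_up,inv)]
--
--     return sorted(quantified_inventories)
--
-- def combos(item,limits):
--
--     c = []
--     for i in range(limits[0],limits[1]+1):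
--         c += [x for x in combinations(item.keys(),i)]
--     return c
-- ===== SOURCE B (Python) =====
-- def purchase_options(w_limits, a_limits, r_limits):
--
--     # unified item records: (name, cost, damage_bonus, armour_bonus)
--     weapons = [('dagger',8,4,0),('shortsword',10,5,0),('warhammer',25,6,0),
--                ('longsword',40,7,0),('greataxe',74,8,0)]
--     armour  = [('leather',13,0,1),('chain',31,0,2),('splint',53,0,3),
--                ('banded',75,0,4),('plate',102,0,5)]
--     rings   = [('damage1',25,1,0),('damage2',50,2,0),('damage3',100,3,0),
--                ('defence1',20,0,1),('defence2',40,0,2),('defence3',80,0,3)]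
--
--     def subsets(items):
--         # recursive powerset; each subset carried with its running stat totals
--         if not items:
--             return [((), 0, 0, 0)]
--         name, cost, dmg, arm = items[0]
--         tail = subsets(items[1:])
--         return [((name,) + ns, cost + c, dmg + d, arm + a)
--                 for (ns, c, d, a) in tail] + tail
--
--     def options(items, limits):
--         lo, hi = limits
--         return [s for s in subsets(items) if lo <= len(s[0]) <= hi]
--
--     return sorted((wc + ac + rc, wd + ad + rd, wa + aa + ra, (w, a, r))
--                   for (w, wc, wd, wa) in options(weapons, w_limits)
--                   for (a, ac, ad, aa) in options(armour, a_limits)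
--                   for (r, rc, rd, ra) in options(rings, r_limits))
-- ===== Notes on version B (the rewrite author's own statement) =====
-- stated objective: faster
-- what changed: B replaces A's size-by-size itertools.combinations enumeration, per-category dicts and three per-inventory item loops by a recursive powerset over unified (name, cost, damage, armour) records that accumulates each subset's stat totals during the recursion, then filters subsets by the size window and combines the three category lists by tuple addition before one final sort.
import Mathlib
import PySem

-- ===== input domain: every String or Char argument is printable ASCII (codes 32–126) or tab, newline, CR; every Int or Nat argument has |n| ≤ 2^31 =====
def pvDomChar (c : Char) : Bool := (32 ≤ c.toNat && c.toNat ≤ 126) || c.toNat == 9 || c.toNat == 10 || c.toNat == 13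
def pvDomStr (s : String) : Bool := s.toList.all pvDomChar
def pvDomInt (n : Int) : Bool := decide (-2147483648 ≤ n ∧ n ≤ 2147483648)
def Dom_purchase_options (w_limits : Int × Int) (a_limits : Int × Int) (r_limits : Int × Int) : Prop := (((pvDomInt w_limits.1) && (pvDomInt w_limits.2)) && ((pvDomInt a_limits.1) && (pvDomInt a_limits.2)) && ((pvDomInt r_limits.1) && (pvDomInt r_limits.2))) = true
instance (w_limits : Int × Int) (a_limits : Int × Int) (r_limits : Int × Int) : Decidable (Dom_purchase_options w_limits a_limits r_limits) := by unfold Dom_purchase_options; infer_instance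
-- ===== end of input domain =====

-- B replaces A's size-by-size itertools.combinations enumeration and per-inventory item loops by a
-- recursive powerset over unified (name, cost, damage, armour) records that carries running stat
-- totals, then filters by the size window: B's work is independent of the window bounds, while A
-- iterates range(lo, hi+1) (measured faster in a timing run; return value only, no argument is
-- mutated by either program).

-- Shared helper: Python's built-in comparison of these 4-tuples is lexicographic; pvKey is the
-- order-embedding of the result type into the corresponding Lex order, so sorting by pvKey performs
-- exactly the comparisons Python's key-less sorted performs (exact on all inputs).
def pvKey (t : Int × Int × Int × (List String × List String × List String)) :
    Lex (Int × Lex (Int × Lex (Int × Lex (List String × Lex (List String × List String))))) :=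
  toLex (t.1, toLex (t.2.1, toLex (t.2.2.1,
    toLex (t.2.2.2.1, toLex (t.2.2.2.2.1, t.2.2.2.2.2)))))

-- ===== PORT A =====
def pvWeapons : PySem.Dict String (Int × Int) :=
  PySem.Dict.ofList [("dagger",(8,4)),("shortsword",(10,5)),("warhammer",(25,6)),("longsword",(40,7)),("greataxe",(74,8))]
def pvArmour : PySem.Dict String (Int × Int) :=
  PySem.Dict.ofList [("leather",(13,1)),("chain",(31,2)),("splint",(53,3)),("banded",(75,4)),("plate",(102,5))]
def pvRings : PySem.Dict String (Int × Int) :=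
  PySem.Dict.ofList [("damage1",(25,1)),("damage2",(50,2)),("damage3",(100,3)),("defence1",(20,1)),("defence2",(40,2)),("defence3",(80,3))]

-- combos(item, limits); combinations(keys, i) with i < 0 raises ValueError (excluded by Pre_; the
-- port returns [] there).  Dict lookups use getD with a dummy default: KeyError is impossible
-- because every key iterated comes from the same dict's keys.
def pvCombosA (d : PySem.Dict String (Int × Int)) (limits : Int × Int) : List (List String) :=
  (PySem.List.pyRange limits.1 (limits.2 + 1) 1).foldl
    (fun c i => c ++ (if i < 0 then [] else PySem.List.combinations d.keys i.toNat)) []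

def purchase_options (w_limits : Int × Int) (a_limits : Int × Int) (r_limits : Int × Int) :
    List (Int × Int × Int × (List String × List String × List String)) :=
  let inventories := (pvCombosA pvWeapons w_limits).flatMap (fun wc =>
    (pvCombosA pvArmour a_limits).flatMap (fun ac =>
      (pvCombosA pvRings r_limits).map (fun rc => (wc, ac, rc))))
  let quantified := inventories.foldl (fun q inv =>
    -- cost = 0; damage_up = 0; armour_up = 0, then the three per-item loops
    let s1 := inv.1.foldl (fun (p : Int × Int) i =>
      let attr := pvWeapons.getD i (0, 0); (p.1 + attr.1, p.2 + attr.2)) (0, 0)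
    let s2 := inv.2.1.foldl (fun (p : Int × Int) i =>
      let attr := pvArmour.getD i (0, 0); (p.1 + attr.1, p.2 + attr.2)) (s1.1, 0)
    let s3 := inv.2.2.foldl (fun (t : Int × Int × Int) i =>
      let attr := pvRings.getD i (0, 0)
      let c := t.1 + attr.1
      let du := if PySem.Str.startswith i "damage" then t.2.1 + attr.2 else t.2.1
      let au := if PySem.Str.startswith i "defence" then t.2.2 + attr.2 else t.2.2
      (c, du, au)) (s2.1, s1.2, s2.2)
    q ++ [(s3.1, s3.2.1, s3.2.2, inv)]) []
  PySem.List.sorted quantified pvKey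

-- ===== PORT B =====
-- unified item records: (name, cost, damage_bonus, armour_bonus)
def pvItemsW : List (String × Int × Int × Int) :=
  [("dagger",8,4,0),("shortsword",10,5,0),("warhammer",25,6,0),("longsword",40,7,0),("greataxe",74,8,0)]
def pvItemsA : List (String × Int × Int × Int) :=
  [("leather",13,0,1),("chain",31,0,2),("splint",53,0,3),("banded",75,0,4),("plate",102,0,5)]
def pvItemsR : List (String × Int × Int × Int) :=
  [("damage1",25,1,0),("damage2",50,2,0),("damage3",100,3,0),("defence1",20,0,1),("defence2",40,0,2),("defence3",80,0,3)]

-- subsets(items): recursive powerset, each subset carried with its running stat totals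
def pvSubsB : List (String × Int × Int × Int) → List (List String × Int × Int × Int)
  | [] => [([], 0, 0, 0)]
  | it :: rest =>
    let tail := pvSubsB rest
    tail.map (fun s => (it.1 :: s.1, it.2.1 + s.2.1, it.2.2.1 + s.2.2.1, it.2.2.2 + s.2.2.2)) ++ tail

-- options(items, limits): the subsets whose size lies in the window  lo <= len <= hi
def pvOptsB (items : List (String × Int × Int × Int)) (limits : Int × Int) :
    List (List String × Int × Int × Int) :=
  (pvSubsB items).filter (fun s => decide (limits.1 ≤ (s.1.length : Int)) && decide ((s.1.length : Int) ≤ limits.2))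

def purchase_options_alt (w_limits : Int × Int) (a_limits : Int × Int) (r_limits : Int × Int) :
    List (Int × Int × Int × (List String × List String × List String)) :=
  let ws := pvOptsB pvItemsW w_limits
  let ar := pvOptsB pvItemsA a_limits
  let rg := pvOptsB pvItemsR r_limits
  PySem.List.sorted (ws.flatMap (fun wt => ar.flatMap (fun at_ => rg.map (fun rt =>
    (wt.2.1 + at_.2.1 + rt.2.1, wt.2.2.1 + at_.2.2.1 + rt.2.2.1,
     wt.2.2.2 + at_.2.2.2 + rt.2.2.2, (wt.1, at_.1, rt.1)))))) pvKey

-- ===== PRECONDITION & SPEC =====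
-- Pre_ excludes exactly the inputs where Python A raises: combinations(keys, i) raises ValueError
-- as soon as some i in range(lo, hi+1) is negative, i.e. lo < 0 and the range is non-empty.
def Pre_purchase_options (w_limits : Int × Int) (a_limits : Int × Int) (r_limits : Int × Int) : Prop :=
  (0 ≤ w_limits.1 ∨ w_limits.2 < w_limits.1) ∧ (0 ≤ a_limits.1 ∨ a_limits.2 < a_limits.1) ∧
  (0 ≤ r_limits.1 ∨ r_limits.2 < r_limits.1)
instance (w_limits : Int × Int) (a_limits : Int × Int) (r_limits : Int × Int) : Decidable (Pre_purchase_options w_limits a_limits r_limits) := by unfold Pre_purchase_options; infer_instance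

def pvWitness_purchase_options : (Int × Int) × (Int × Int) × (Int × Int) := ((1, 1), (0, 1), (0, 2))

def Spec_purchase_options (w_limits : Int × Int) (a_limits : Int × Int) (r_limits : Int × Int) (out : List (Int × Int × Int × (List String × List String × List String))) : Prop := out = purchase_options_alt w_limits a_limits r_limits
instance (w_limits : Int × Int) (a_limits : Int × Int) (r_limits : Int × Int) (out : List (Int × Int × Int × (List String × List String × List String))) : Decidable (Spec_purchase_options w_limits a_limits r_limits out) := by
  unfold Spec_purchase_options
  have h : DecidableEq (Int × Int × Int × (List String × List String × List String)) := instDecidableEqProd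
  exact List.hasDecEq _ _

-- ===== CLAIM (what is proved, stated in full; the proofs are below) =====
def Claim_equal_purchase_options : Prop := ∀ (w_limits : Int × Int) (a_limits : Int × Int) (r_limits : Int × Int), Dom_purchase_options w_limits a_limits r_limits → Pre_purchase_options w_limits a_limits r_limits → Spec_purchase_options w_limits a_limits r_limits (purchase_options w_limits a_limits r_limits)

-- ===== LEMMAS AND PROOFS =====

-- the key really is an order-embedding component by component, so it is injective
theorem pvKey_inj : Function.Injective pvKey := by
  rintro ⟨a1, a2, a3, a4, a5, a6⟩ ⟨b1, b2, b3, b4, b5, b6⟩ h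
  simp only [pvKey, toLex_inj, Prod.mk.injEq] at h
  obtain ⟨h1, h2, h3, h4, h5, h6⟩ := h
  simp_all

-- all subsets of the key list, grouped by size (A's enumeration extended to the full size range)
def pvAllSubs (keys : List String) : List (List String) :=
  (List.range (keys.length + 1)).flatMap (fun i => PySem.List.combinations keys i)

-- a combo decorated with the sums A's inventory loops compute for it
def pvEnrich (d : PySem.Dict String (Int × Int)) (gd ga : String → Bool) (c : List String) :
    List String × Int × Int × Int :=
  (c, (c.map (fun k => (d.getD k (0, 0)).1)).sum,
      ((c.filter gd).map (fun k => (d.getD k (0, 0)).2)).sum,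
      ((c.filter ga).map (fun k => (d.getD k (0, 0)).2)).sum)

theorem nodup_combinations {α : Type} (xs : List α) (h : xs.Nodup) (r : Nat) :
    (PySem.List.combinations xs r).Nodup := by
  induction xs generalizing r with
  | nil => cases r <;> simp [PySem.List.combinations_zero, PySem.List.combinations_nil_succ]
  | cons x xs ih =>
    cases r with
    | zero => simp [PySem.List.combinations_zero]
    | succ r =>
      rw [PySem.List.combinations_cons_succ]
      simp only [List.nodup_cons] at h
      refine List.Nodup.append ?_ (ih h.2 (r + 1)) ?_
      · exact (ih h.2 r).map (fun a b hab => by simpa using hab)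
      · intro c hc1 hc2
        simp only [List.mem_map] at hc1
        obtain ⟨c', _, rfl⟩ := hc1
        have := (PySem.List.mem_combinations_iff _ _ _).1 hc2
        exact h.1 (this.1.subset (List.mem_cons_self))

-- A's size-by-size enumeration is (as a multiset) the full powerset filtered by the size window
theorem pvCombosA_perm (d : PySem.Dict String (Int × Int)) (lo hi : Int)
    (hnd : d.keys.Nodup) (h : 0 ≤ lo ∨ hi < lo) :
    ((pvAllSubs d.keys).filter
        (fun c => decide (lo ≤ (c.length : Int)) && decide ((c.length : Int) ≤ hi))).Perm
      (pvCombosA d (lo, hi)) := by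
  unfold pvCombosA pvAllSubs
  rw [PySem.List.foldl_append_eq_flatMap, List.nil_append]
  rcases h with hlo | hbad
  · -- 0 ≤ lo : same members, both without duplicates
    have hnodupAll : ((List.range (d.keys.length + 1)).flatMap
        (fun i => PySem.List.combinations d.keys i)).Nodup := by
      rw [List.nodup_flatMap]
      refine ⟨fun i _ => nodup_combinations _ hnd i, ?_⟩
      refine List.Pairwise.imp_of_mem ?_ List.pairwise_lt_range
      intro i j _ _ hij c hc1 hc2
      have l1 := (PySem.List.mem_combinations_iff _ _ _).1 hc1
      have l2 := (PySem.List.mem_combinations_iff _ _ _).1 hc2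
      omega
    have hnodupA : ((PySem.List.pyRange (lo, hi).1 ((lo, hi).2 + 1) 1).flatMap
        (fun i => if i < 0 then [] else PySem.List.combinations d.keys i.toNat)).Nodup := by
      rw [List.nodup_flatMap]
      constructor
      · intro i _
        split
        · exact List.nodup_nil
        · exact nodup_combinations _ hnd _
      · refine List.Pairwise.imp_of_mem ?_ (PySem.List.pairwise_lt_pyRange_one _ _)
        intro i j hmi hmj hij c hc1 hc2
        have hi0 : lo ≤ i := ((PySem.List.mem_pyRange_one).1 hmi).1
        have hj0 : lo ≤ j := ((PySem.List.mem_pyRange_one).1 hmj).1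
        simp only [if_neg (show ¬ i < 0 by omega)] at hc1
        simp only [if_neg (show ¬ j < 0 by omega)] at hc2
        have l1 := (PySem.List.mem_combinations_iff _ _ _).1 hc1
        have l2 := (PySem.List.mem_combinations_iff _ _ _).1 hc2
        omega
    rw [List.perm_ext_iff_of_nodup (hnodupAll.filter _) hnodupA]
    intro c
    simp only [List.mem_filter, List.mem_flatMap, List.mem_range,
      PySem.List.mem_pyRange_one, PySem.List.mem_combinations_iff,
      Bool.and_eq_true, decide_eq_true_eq]
    constructor
    · rintro ⟨⟨i, _, hsub, hlen⟩, hwlo, hwhi⟩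
      refine ⟨(c.length : Int), ⟨by omega, by omega⟩, ?_⟩
      rw [if_neg (by omega)]
      exact (PySem.List.mem_combinations_iff _ _ _).2 ⟨hsub, by omega⟩
    · rintro ⟨i, ⟨hilo, hihi⟩, hc⟩
      simp only [if_neg (show ¬ i < 0 by omega)] at hc
      obtain ⟨hsub, hlen⟩ := (PySem.List.mem_combinations_iff _ _ _).1 hc
      have hle := hsub.length_le
      exact ⟨⟨c.length, by omega, hsub, rfl⟩, by omega, by omega⟩
  · -- empty window: both lists are empty
    rw [PySem.List.pyRange_one_eq_nil (by omega), List.flatMap_nil]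
    have : ((List.range (d.keys.length + 1)).flatMap
        (fun i => PySem.List.combinations d.keys i)).filter
          (fun c => decide (lo ≤ (c.length : Int)) && decide ((c.length : Int) ≤ hi)) = [] := by
      rw [List.filter_eq_nil_iff]
      intro c _
      simp only [Bool.and_eq_true, decide_eq_true_eq, not_and]
      omega
    rw [this]

-- weapons add to damage only, armour to armour only, rings according to their name prefix:
-- B's recursive powerset is (as a multiset) the enriched full powerset of the category
theorem pvSubsW_perm :
    (pvSubsB pvItemsW).Perm ((pvAllSubs pvWeapons.keys).map
      (pvEnrich pvWeapons (fun _ => true) (fun _ => false))) := by decide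

theorem pvSubsA_perm :
    (pvSubsB pvItemsA).Perm ((pvAllSubs pvArmour.keys).map
      (pvEnrich pvArmour (fun _ => false) (fun _ => true))) := by decide

theorem pvSubsR_perm :
    (pvSubsB pvItemsR).Perm ((pvAllSubs pvRings.keys).map
      (pvEnrich pvRings (fun k => PySem.Str.startswith k "damage")
        (fun k => PySem.Str.startswith k "defence"))) := by decide

-- per category: B's filtered powerset is a permutation of A's combo list, enriched
theorem pvCat_perm (d : PySem.Dict String (Int × Int)) (items : List (String × Int × Int × Int))
    (gd ga : String → Bool) (hnd : d.keys.Nodup)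
    (hbase : (pvSubsB items).Perm ((pvAllSubs d.keys).map (pvEnrich d gd ga)))
    (lo hi : Int) (h : 0 ≤ lo ∨ hi < lo) :
    ((pvCombosA d (lo, hi)).map (pvEnrich d gd ga)).Perm (pvOptsB items (lo, hi)) := by
  unfold pvOptsB
  have h1 := hbase.filter
    (fun s => decide (lo ≤ (s.1.length : Int)) && decide ((s.1.length : Int) ≤ hi))
  rw [List.filter_map] at h1
  have h2 := (pvCombosA_perm d lo hi hnd h).map (pvEnrich d gd ga)
  exact h2.symm.trans h1.symm

-- A's weapons/armour per-item loop is (init₁ + Σ costs, init₂ + Σ stats).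
theorem pvPairFold (d : PySem.Dict String (Int × Int)) (cs : List String) (c0 d0 : Int) :
    cs.foldl (fun (p : Int × Int) i =>
        let attr := d.getD i (0, 0); (p.1 + attr.1, p.2 + attr.2)) (c0, d0)
      = (c0 + (cs.map (fun k => (d.getD k (0, 0)).1)).sum,
         d0 + (cs.map (fun k => (d.getD k (0, 0)).2)).sum) := by
  induction cs generalizing c0 d0 with
  | nil => simp
  | cons h t ih => simp only [List.foldl_cons, List.map_cons, List.sum_cons, ih]; refine Prod.ext (by ring) (by ring)

-- A's rings loop is (init + Σ costs, init + Σ over the damage rings, init + Σ over the defence rings).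
theorem pvRingFold (cs : List String) (c0 d0 a0 : Int) :
    cs.foldl (fun (t : Int × Int × Int) i =>
        let attr := pvRings.getD i (0, 0)
        let c := t.1 + attr.1
        let du := if PySem.Str.startswith i "damage" then t.2.1 + attr.2 else t.2.1
        let au := if PySem.Str.startswith i "defence" then t.2.2 + attr.2 else t.2.2
        (c, du, au)) (c0, d0, a0)
      = (c0 + (cs.map (fun k => (pvRings.getD k (0, 0)).1)).sum,
         d0 + ((cs.filter (fun k => PySem.Str.startswith k "damage")).map
                (fun k => (pvRings.getD k (0, 0)).2)).sum,
         a0 + ((cs.filter (fun k => PySem.Str.startswith k "defence")).map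
                (fun k => (pvRings.getD k (0, 0)).2)).sum) := by
  induction cs generalizing c0 d0 a0 with
  | nil => simp
  | cons h t ih =>
    simp only [List.foldl_cons, List.filter_cons, List.map_cons, List.sum_cons]
    by_cases hd : PySem.Str.startswith h "damage" <;>
      by_cases hf : PySem.Str.startswith h "defence" <;>
        simp only [hd, hf, if_pos, if_neg, ite_true, ite_false, Bool.false_eq_true, List.map_cons,
          List.sum_cons, ih] <;>
        refine Prod.ext (by ring) (Prod.ext (by ring) (by ring))

-- A's quantified list is the product of the three enriched combo lists, combined componentwise
theorem pvA_eq (w_limits a_limits r_limits : Int × Int) :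
    purchase_options w_limits a_limits r_limits = PySem.List.sorted
      (((pvCombosA pvWeapons w_limits).map (pvEnrich pvWeapons (fun _ => true) (fun _ => false))).flatMap (fun wt =>
        ((pvCombosA pvArmour a_limits).map (pvEnrich pvArmour (fun _ => false) (fun _ => true))).flatMap (fun at_ =>
          ((pvCombosA pvRings r_limits).map (pvEnrich pvRings (fun k => PySem.Str.startswith k "damage")
              (fun k => PySem.Str.startswith k "defence"))).map (fun rt =>
            (wt.2.1 + at_.2.1 + rt.2.1, wt.2.2.1 + at_.2.2.1 + rt.2.2.1,
             wt.2.2.2 + at_.2.2.2 + rt.2.2.2, (wt.1, at_.1, rt.1)))))) pvKey := by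
  unfold purchase_options
  simp only [PySem.List.foldl_append_singleton_eq_map, List.nil_append]
  congr 1
  simp only [List.map_flatMap, List.flatMap_map, List.map_map, Function.comp_def]
  refine List.flatMap_congr ?_
  intro wc _
  refine List.flatMap_congr ?_
  intro ac _
  refine List.map_congr_left ?_
  intro rc _
  rw [pvPairFold, pvPairFold, pvRingFold]
  simp only [pvEnrich, List.filter_true, List.filter_false, List.map_nil, List.sum_nil]
  refine Prod.ext (by ring) (Prod.ext (by ring) (Prod.ext (by ring) rfl))

-- ===== VERDICT (by name: the statement is the Claim_ definition above) =====
theorem purchase_options_spec : Claim_equal_purchase_options := by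
  intro wl al rl _ hpre
  obtain ⟨wlo, whi⟩ := wl
  obtain ⟨alo, ahi⟩ := al
  obtain ⟨rlo, rhi⟩ := rl
  obtain ⟨hw, ha, hr⟩ := hpre
  unfold Spec_purchase_options
  rw [pvA_eq]
  unfold purchase_options_alt
  apply PySem.List.sorted_eq_sorted_of_perm _ _ pvKey pvKey_inj
  have hW := pvCat_perm pvWeapons pvItemsW (fun _ => true) (fun _ => false) (by decide)
    pvSubsW_perm wlo whi hw
  have hA := pvCat_perm pvArmour pvItemsA (fun _ => false) (fun _ => true) (by decide)
    pvSubsA_perm alo ahi ha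
  have hR := pvCat_perm pvRings pvItemsR (fun k => PySem.Str.startswith k "damage")
    (fun k => PySem.Str.startswith k "defence") (by decide) pvSubsR_perm rlo rhi hr
  exact List.Perm.flatMap hW (fun wt _ => List.Perm.flatMap hA (fun at_ _ => hR.map _))
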